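-- pv_equiv track=rewrite | github.com/Sebbsoon/AoC23 | 1/2/calcSum.py | find_last_number
-- ===== SOURCE A (Python) =====
-- def find_last_number(text):
--     spelled_out_numbers = {
--         'one': '1', 'two': '2', 'three': '3', 'four': '4', 'five': '5',
--         'six': '6', 'seven': '7', 'eight': '8', 'nine': '9'
--     }
--
--     max_index = -1  # Initialize max_index with -1
--     result_number = None
--
--     for word, number in spelled_out_numbers.items():
--         index = text.rfind(word)  # rfind searches for the last occurrence
--         if index > max_index:
--             max_index = index
--             result_number = int(number)
--
--     return result_number, max_index
-- ===== SOURCE B (Python) =====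
-- def find_last_number(text):
--     spelled_out_numbers = {
--         'one': 1, 'two': 2, 'three': 3, 'four': 4, 'five': 5,
--         'six': 6, 'seven': 7, 'eight': 8, 'nine': 9
--     }
--     for i in range(len(text) - 1, -1, -1):
--         for word, num in spelled_out_numbers.items():
--             if text.startswith(word, i):
--                 return num, i
--     return None, -1
-- ===== Notes on version B (the rewrite author's own statement) =====
-- stated objective: alternative
-- what changed: A runs rfind over the whole text for each of the nine spelled-out words and keeps the max index; B makes a single right-to-left scan over text positions and returns at the first position where any word starts.
import Mathlib
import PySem

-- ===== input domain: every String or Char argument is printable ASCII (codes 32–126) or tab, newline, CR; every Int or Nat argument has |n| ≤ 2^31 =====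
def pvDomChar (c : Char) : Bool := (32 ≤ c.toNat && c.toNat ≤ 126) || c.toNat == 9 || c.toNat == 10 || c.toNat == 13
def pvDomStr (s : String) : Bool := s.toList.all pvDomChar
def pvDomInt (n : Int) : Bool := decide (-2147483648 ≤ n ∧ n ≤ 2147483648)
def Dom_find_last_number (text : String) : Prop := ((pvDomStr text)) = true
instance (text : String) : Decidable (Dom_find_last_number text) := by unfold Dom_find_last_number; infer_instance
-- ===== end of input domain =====

-- B replaces A's nine whole-string rfind scans (each followed by a max update) by a single
-- right-to-left scan over text positions that returns at the first position where a word starts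
-- (objective: alternative decomposition; same result, same asymptotic cost).

-- ===== PORT A =====
-- the dict literal of A, in insertion order (word, digit-string)
def spelledA : List (String × String) :=
  [("one", "1"), ("two", "2"), ("three", "3"), ("four", "4"), ("five", "5"),
   ("six", "6"), ("seven", "7"), ("eight", "8"), ("nine", "9")]

def find_last_number (text : String) : Option Int × Int :=
  let st := spelledA.foldl (fun (st : Int × Option Int) wn =>
      let index := PySem.Str.rfind text wn.1
      -- int(number): the dict values are the digit strings "1".."9", so ValueError is impossible
      if index > st.1 then (index, some ((PySem.Int.ofStr? wn.2).getD 0)) else st)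
    (-1, none)
  (st.2, st.1)

-- ===== PORT B =====
-- the dict literal of B, in insertion order (word, value)
def spelledB : List (String × Int) :=
  [("one", 1), ("two", 2), ("three", 3), ("four", 4), ("five", 5),
   ("six", 6), ("seven", 7), ("eight", 8), ("nine", 9)]

-- inner 'for word, num in …items()': first word starting at position i.
-- text.startswith(word, i) with 0 ≤ i ≤ len(text) is exactly word <+: text[i:] (prefix of drop i).
def altInner (cs : List Char) (i : Nat) : List (String × Int) → Option Int
  | [] => none
  | wn :: rest =>
      if PySem.Chars.startswith (cs.drop i) wn.1.toList then some wn.2 else altInner cs i rest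

-- outer 'for i in range(len(text)-1, -1, -1)': altGo cs (k+1) examines position k, then recurses
def altGo (cs : List Char) : Nat → Option Int × Int
  | 0 => (none, -1)
  | k + 1 =>
      match altInner cs k spelledB with
      | some d => (some d, (k : Int))
      | none => altGo cs k

def find_last_number_alt (text : String) : Option Int × Int :=
  altGo text.toList text.toList.length

-- ===== PRECONDITION & SPEC =====
def Spec_find_last_number (text : String) (out : Option Int × Int) : Prop := out = find_last_number_alt text
instance (text : String) (out : Option Int × Int) : Decidable (Spec_find_last_number text out) := by unfold Spec_find_last_number; infer_instance

-- ===== CLAIM (what is proved, stated in full; the proofs are below) =====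
def Claim_equal_find_last_number : Prop := ∀ (text : String), Dom_find_last_number text → Spec_find_last_number text (find_last_number text)

-- ===== LEMMAS AND PROOFS =====

-- A's fold, abstracted over the per-word index function g
def foldW (g : List Char → Int) (ws : List (String × Int)) (st : Int × Option Int) : Int × Option Int :=
  ws.foldl (fun st wn => let v := g wn.1.toList; if v > st.1 then (v, some wn.2) else st) st

theorem foldW_cons (g : List Char → Int) (wn : String × Int) (rest : List (String × Int))
    (st : Int × Option Int) :
    foldW g (wn :: rest) st =
      foldW g rest (if g wn.1.toList > st.1 then (g wn.1.toList, some wn.2) else st) := rfl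

-- A's port is the abstract fold with g = rfind.go at bound cs.length (digit strings already read)
theorem A_as_foldW (text : String) :
    find_last_number text =
      ((foldW (fun w => PySem.Chars.rfind.go text.toList w text.toList.length)
          spelledB (-1, none)).2,
       (foldW (fun w => PySem.Chars.rfind.go text.toList w text.toList.length)
          spelledB (-1, none)).1) := rfl

theorem go_le (cs w : List Char) : ∀ j : Nat, PySem.Chars.rfind.go cs w j ≤ (j : Int)
  | 0 => by simp [PySem.Chars.rfind.go]; split <;> simp
  | j + 1 => by
      rw [PySem.Chars.rfind.go]
      split
      · simp
      · have := go_le cs w j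
        push_cast
        omega

theorem foldW_stay (g : List Char → Int) (ws : List (String × Int)) (st : Int × Option Int)
    (h : ∀ wn ∈ ws, g wn.1.toList ≤ st.1) : foldW g ws st = st := by
  induction ws with
  | nil => rfl
  | cons wn rest ih =>
      have h1 := h wn (by simp)
      rw [foldW_cons, if_neg (by omega)]
      exact ih fun x hx => h x (by simp [hx])

theorem foldW_step (B' : Int) (p : List Char → Bool) (f : List Char → Int)
    (ws : List (String × Int)) (st : Int × Option Int)
    (hst : st.1 < B') (hf : ∀ wn ∈ ws, f wn.1.toList < B') :
    foldW (fun w => if p w then B' else f w) ws st =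
      (match ws.find? (fun wn => p wn.1.toList) with
       | some wn => (B', some wn.2)
       | none => foldW f ws st) := by
  induction ws generalizing st with
  | nil => rfl
  | cons wn rest ih =>
      by_cases hp : p wn.1.toList
      · rw [foldW_cons]
        simp only [List.find?_cons, hp]
        simp only [if_true]
        rw [if_pos (by omega : B' > st.1)]
        exact foldW_stay _ rest (B', some wn.2) fun x hx => by
          by_cases hpx : p x.1.toList
          · simp [hpx]
          · simpa [hpx] using le_of_lt (hf x (by simp [hx]))
      · have hfw := hf wn (by simp)
        have hfalse : p wn.1.toList = false := eq_false_of_ne_true hp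
        rw [foldW_cons, foldW_cons]
        simp only [List.find?_cons, hfalse]
        simp only [Bool.false_eq_true, if_false]
        by_cases hlt : f wn.1.toList > st.1
        · rw [if_pos hlt]
          exact ih (f wn.1.toList, some wn.2) hfw (fun x hx => hf x (by simp [hx]))
        · rw [if_neg hlt]
          exact ih st hst (fun x hx => hf x (by simp [hx]))

theorem inner_eq_find? (cs : List Char) (i : Nat) (ws : List (String × Int)) :
    altInner cs i ws =
      (ws.find? (fun wn => wn.1.toList.isPrefixOf (cs.drop i))).map (·.2) := by
  induction ws with
  | nil => rfl
  | cons wn rest ih =>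
      by_cases h : wn.1.toList.isPrefixOf (cs.drop i)
      · simp [altInner, PySem.Chars.startswith, h]
      · rw [show altInner cs i (wn :: rest)
              = if PySem.Chars.startswith (cs.drop i) wn.1.toList then some wn.2
                else altInner cs i rest from rfl]
        have hfalse : wn.1.toList.isPrefixOf (cs.drop i) = false := eq_false_of_ne_true h
        simp only [List.find?_cons, hfalse]
        rw [if_neg (by simpa [PySem.Chars.startswith] using h)]
        exact ih

-- the crux: B's right-to-left positional scan over positions k-1 … 0 equals A's fold with
-- per-word last-occurrence search bounded by k-1
theorem altGo_eq_foldW (cs : List Char) : ∀ k : Nat,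
    altGo cs (k + 1) =
      ((foldW (fun w => PySem.Chars.rfind.go cs w k) spelledB (-1, none)).2,
       (foldW (fun w => PySem.Chars.rfind.go cs w k) spelledB (-1, none)).1)
  | 0 => by
      have hgo : ∀ w : List Char, PySem.Chars.rfind.go cs w 0 =
          if w.isPrefixOf (cs.drop 0) then (0 : Int) else -1 := by
        intro w; simp [PySem.Chars.rfind.go]
      rw [show (fun w => PySem.Chars.rfind.go cs w 0)
            = fun w => if w.isPrefixOf (cs.drop 0) then (0 : Int) else (fun _ => (-1 : Int)) w
          from funext hgo]
      rw [foldW_step 0 (fun w => w.isPrefixOf (cs.drop 0)) _ spelledB (-1, none)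
            (by norm_num) (by intro wn _; norm_num)]
      rw [show altGo cs 1
            = (match altInner cs 0 spelledB with
               | some d => (some d, ((0 : Nat) : Int))
               | none => altGo cs 0) from rfl]
      rw [inner_eq_find?]
      cases hf : spelledB.find? (fun wn => wn.1.toList.isPrefixOf (cs.drop 0)) with
      | some wn => simp
      | none =>
          rw [Option.map_none, foldW_stay _ spelledB (-1, none) (by intro wn _; norm_num)]
          rfl
  | k + 1 => by
      have hgo : ∀ w : List Char, PySem.Chars.rfind.go cs w (k + 1) =
          if w.isPrefixOf (cs.drop (k + 1)) then ((k : Int) + 1)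
          else PySem.Chars.rfind.go cs w k := by
        intro w; rw [PySem.Chars.rfind.go]; push_cast; rfl
      rw [show (fun w => PySem.Chars.rfind.go cs w (k + 1))
            = fun w => if w.isPrefixOf (cs.drop (k + 1)) then ((k : Int) + 1)
                else PySem.Chars.rfind.go cs w k
          from funext hgo]
      rw [foldW_step ((k : Int) + 1) (fun w => w.isPrefixOf (cs.drop (k + 1))) _ spelledB (-1, none)
            (by push_cast; omega) (by intro wn _; have := go_le cs wn.1.toList k; omega)]
      rw [show altGo cs (k + 1 + 1)
            = (match altInner cs (k + 1) spelledB with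
               | some d => (some d, ((k + 1 : Nat) : Int))
               | none => altGo cs (k + 1)) from rfl]
      rw [inner_eq_find?]
      cases hf : spelledB.find? (fun wn => wn.1.toList.isPrefixOf (cs.drop (k + 1))) with
      | some wn => push_cast; simp
      | none => rw [Option.map_none]; exact altGo_eq_foldW cs k

-- the nine words are nonempty, so no word starts at position cs.length:
-- A's per-word search at bound cs.length reduces to bound cs.length - 1
theorem go_length (cs : List Char) (k : Nat) (hk : cs.length = k + 1) (w : List Char)
    (hw : w ≠ []) : PySem.Chars.rfind.go cs w (k + 1) = PySem.Chars.rfind.go cs w k := by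
  rw [PySem.Chars.rfind.go]
  have hd : cs.drop (k + 1) = [] := List.drop_eq_nil_of_le (by omega)
  rw [hd]
  cases w with
  | nil => exact absurd rfl hw
  | cons a l => rfl

theorem foldW_congr (g₁ g₂ : List Char → Int) (ws : List (String × Int)) (st : Int × Option Int)
    (h : ∀ wn ∈ ws, g₁ wn.1.toList = g₂ wn.1.toList) : foldW g₁ ws st = foldW g₂ ws st := by
  induction ws generalizing st with
  | nil => rfl
  | cons wn rest ih =>
      rw [foldW_cons, foldW_cons, h wn (by simp)]
      exact ih _ fun x hx => h x (by simp [hx])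

-- ===== VERDICT (by name: the statement is the Claim_ definition above) =====
theorem find_last_number_spec : Claim_equal_find_last_number := by
  intro text _
  unfold Spec_find_last_number
  rw [A_as_foldW]
  show _ = altGo text.toList text.toList.length
  cases hl : text.toList.length with
  | zero =>
      have hnil : text.toList = [] := List.length_eq_zero_iff.mp hl
      rw [hnil]
      rw [foldW_stay _ spelledB (-1, none) (by decide)]
      rfl
  | succ k =>
      rw [altGo_eq_foldW text.toList k]
      rw [foldW_congr _ (fun w => PySem.Chars.rfind.go text.toList w k) spelledB (-1, none)
            (fun wn hwn => go_length text.toList k hl wn.1.toList (by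
              fin_cases hwn <;> decide))]
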